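-- pv_equiv track=rewrite | github.com/TCKnickerbocker/shortPythonProblems | shortProblems.py | bigram_count
-- ===== SOURCE A (Python) =====
-- def bigram_count(string):
--   '''
--   Purpose: make a function taking a string and returning a dictionary containing all consecutive words within the string, and each time that pair of words appears together as the value
--   Input Paramater(s):
--   string: a user-entered string that will be counted by our dictionary
--   Return Value(s):
--   bigram_dict: a dictionary containing each word as a key and a smaller dictionary containing the number of times a specific word follows that key word in the sentence as a value
--   '''
--
--   a = string.split()
--   bigram_dict = {}
--   h = []
--
--   for i in range(len(a[:])-1):
--     current = a[i]
--     nextWord = a[i+1]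
--     minidict = {}
--
--     if current not in bigram_dict:
--       bigram_dict[current] = {nextWord:1}
--
--     else:
--       minidict = bigram_dict[current]
--       if nextWord in minidict:
--         minidict[nextWord] += 1
--       else:
--         minidict[nextWord] = 1
--
--   return bigram_dict
-- ===== SOURCE B (Python) =====
-- def bigram_count(string):
--   a = string.split()
--   pairs = list(zip(a, a[1:]))
--   bigram_dict = {}
--   for current in dict.fromkeys(w for w, _ in pairs):
--     followers = [n for w, n in pairs if w == current]
--     bigram_dict[current] = {n: followers.count(n) for n in dict.fromkeys(followers)}
--   return bigram_dict
-- ===== Notes on version B (the rewrite author's own statement) =====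
-- stated objective: simpler
-- what changed: B replaces A's index loop with incremental nested-dict mutation by a count-then-regroup pass: it materialises the bigram pair list once (zip), iterates over the distinct first words in order of first appearance, and builds each inner dict directly from follower counts via a dict comprehension.
import Mathlib
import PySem

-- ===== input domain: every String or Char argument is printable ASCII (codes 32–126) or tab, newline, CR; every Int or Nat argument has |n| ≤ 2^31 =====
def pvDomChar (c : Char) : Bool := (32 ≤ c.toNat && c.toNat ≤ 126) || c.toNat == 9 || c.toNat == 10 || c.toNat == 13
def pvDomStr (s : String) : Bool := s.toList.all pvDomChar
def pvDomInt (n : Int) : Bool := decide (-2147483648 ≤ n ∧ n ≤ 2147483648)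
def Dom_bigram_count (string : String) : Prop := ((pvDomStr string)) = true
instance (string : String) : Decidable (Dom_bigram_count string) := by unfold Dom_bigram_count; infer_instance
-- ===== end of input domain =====

-- B builds the same nested bigram dict by a count-then-regroup pass (distinct first words, then
-- follower counts) instead of A's incremental per-pair dict mutation; objective: simpler.

-- ===== PORT A =====
-- Python A mutates minidict (= bigram_dict[current]) in place; with immutable dicts that
-- mutation is written back as d.insert current …, which keeps current's position — Python-exact.
-- bigram_dict[current] in the else branch is ported as getD (KeyError impossible there: the
-- branch is only reached when current is a key).  h = [] is unused in A and omitted.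
def bigram_count (string : String) : List (String × List (String × Int)) :=
  let a := PySem.Str.split₀ string
  let bd := (PySem.List.pyRange 0 (((PySem.List.slice a none none).length : Int) - 1) 1).foldl
    (fun d i =>
      let current := PySem.List.pyGetD a i ""
      let nextWord := PySem.List.pyGetD a (i + 1) ""
      if d.contains current = false then
        d.insert current (PySem.Dict.ofList [(nextWord, (1 : Int))])
      else
        let minidict := d.getD current PySem.Dict.empty
        if minidict.contains nextWord then
          d.insert current (minidict.insert nextWord (minidict.getD nextWord 0 + 1))
        else
          d.insert current (minidict.insert nextWord 1))
    PySem.Dict.empty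
  bd.items.map (fun kv => (kv.1, kv.2.items))

-- ===== PORT B =====
def bigram_count_alt (string : String) : List (String × List (String × Int)) :=
  let a := PySem.Str.split₀ string
  let pairs := a.zip (PySem.List.slice a (some 1) none)   -- list(zip(a, a[1:]))
  let bd := (PySem.List.dedup (pairs.map (·.1))).foldl    -- dict.fromkeys(w for w, _ in pairs)
    (fun d current =>
      let followers := (pairs.filter (fun p => p.1 == current)).map (·.2)
      d.insert current
        ((PySem.List.dedup followers).foldl               -- {n: followers.count(n) for n in dict.fromkeys(followers)}
          (fun inner n => inner.insert n ((followers.count n : Int))) PySem.Dict.empty))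
    PySem.Dict.empty
  bd.items.map (fun kv => (kv.1, kv.2.items))

-- ===== PRECONDITION & SPEC =====
def Spec_bigram_count (string : String) (out : List (String × List (String × Int))) : Prop := out = bigram_count_alt string
instance (string : String) (out : List (String × List (String × Int))) : Decidable (Spec_bigram_count string out) := by unfold Spec_bigram_count; infer_instance

-- ===== CLAIM (what is proved, stated in full; the proofs are below) =====
def Claim_equal_bigram_count : Prop := ∀ (string : String), Dom_bigram_count string → Spec_bigram_count string (bigram_count string)

-- ===== LEMMAS AND PROOFS =====

-- A's canonical per-pair step: all three branches of A's loop body collapse to this.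
def pvStep (d : PySem.Dict String (PySem.Dict String Int)) (p : String × String) :
    PySem.Dict String (PySem.Dict String Int) :=
  d.insert p.1 ((d.getD p.1 PySem.Dict.empty).insert p.2
    ((d.getD p.1 PySem.Dict.empty).getD p.2 0 + 1))

lemma pvStepA_eq (d : PySem.Dict String (PySem.Dict String Int)) (c n : String) :
    (if d.contains c = false then
        d.insert c (PySem.Dict.ofList [(n, (1 : Int))])
      else
        let minidict := d.getD c PySem.Dict.empty
        if minidict.contains n then
          d.insert c (minidict.insert n (minidict.getD n 0 + 1))
        else
          d.insert c (minidict.insert n 1))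
    = pvStep d (c, n) := by
  unfold pvStep
  by_cases h : d.contains c = false
  · simp only [h, if_true]
    rw [PySem.Dict.getD_of_not_contains d _ h]
    simp [PySem.Dict.getD_empty]
    rfl
  · simp only [h]
    by_cases h2 : (d.getD c PySem.Dict.empty).contains n
    · simp [h2]
    · simp only [Bool.not_eq_true] at h2
      simp only [h2]
      rw [PySem.Dict.getD_of_not_contains _ _ h2]
      simp

-- the index loop over range(len(a)-1) with a[i], a[i+1] is the fold over zip(a, a[1:]) (Nat form)
lemma pvNatZipFold {α β : Type} (dflt : α) :
    ∀ (a : List α) (g : β → α × α → β) (d0 : β),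
    (List.range (a.length - 1)).foldl (fun d i => g d (a.getD i dflt, a.getD (i + 1) dflt)) d0
      = (a.zip a.tail).foldl g d0 := by
  intro a
  induction a with
  | nil => intro g d0; simp
  | cons x t ih =>
    intro g d0
    cases t with
    | nil => simp
    | cons y t' =>
      simp only [List.length_cons, Nat.add_sub_cancel, List.range_succ_eq_map,
        List.foldl_cons, List.foldl_map, List.getD_cons_zero, List.getD_cons_succ,
        List.tail_cons, List.zip_cons_cons]
      have := ih (g := g) (d0 := g d0 (x, y))
      simp only [List.length_cons, Nat.add_sub_cancel, List.tail_cons] at this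
      exact this

lemma pvRangeZipFold {α β : Type} (a : List α) (dflt : α) (g : β → α × α → β) (d0 : β) :
    (PySem.List.pyRange 0 ((a.length : Int) - 1) 1).foldl
      (fun d i => g d (PySem.List.pyGetD a i dflt, PySem.List.pyGetD a (i + 1) dflt)) d0
      = (a.zip a.tail).foldl g d0 := by
  rw [PySem.List.pyRange_one, List.foldl_map]
  have hcast : ((a.length : Int) - 1 - 0).toNat = a.length - 1 := by omega
  rw [hcast, ← pvNatZipFold dflt a g d0]
  have hfun : (fun (d : β) (i : Nat) =>
      g d (PySem.List.pyGetD a ((0 : Int) + (i : Int)) dflt,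
           PySem.List.pyGetD a ((0 : Int) + (i : Int) + 1) dflt))
      = (fun (d : β) (i : Nat) => g d (a.getD i dflt, a.getD (i + 1) dflt)) := by
    funext d i
    have h1 : (0 : Int) + (i : Int) = ((i : Nat) : Int) := by omega
    rw [h1]
    have h2 : ((i : Nat) : Int) + 1 = (((i + 1 : Nat)) : Int) := by push_cast; ring
    rw [h2, PySem.List.pyGetD_natCast, PySem.List.pyGetD_natCast]
  rw [hfun]

-- the accumulated inner dict at key c is the follower-counting fold over the pairs whose first is c
lemma pvGetD_foldl_step (l : List (String × String)) :
    ∀ (d : PySem.Dict String (PySem.Dict String Int)) (c : String),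
    (l.foldl pvStep d).getD c PySem.Dict.empty
      = ((l.filter (fun p => p.1 == c)).map (·.2)).foldl
          (fun inner n => inner.insert n (inner.getD n 0 + 1)) (d.getD c PySem.Dict.empty) := by
  induction l with
  | nil => intro d c; simp
  | cons p l ih =>
    intro d c
    by_cases h : p.1 = c
    · subst h
      simp only [List.foldl_cons, List.filter_cons, beq_self_eq_true, if_true, List.map_cons]
      rw [ih]
      congr 1
      unfold pvStep
      rw [PySem.Dict.getD_insert_self]
    · have hb : (p.1 == c) = false := by simp [h]
      simp only [List.foldl_cons, List.filter_cons, hb]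
      rw [ih]
      congr 1
      unfold pvStep
      rw [PySem.Dict.getD_insert_of_ne _ _ _ (Ne.symm h)]

-- ===== VERDICT (by name: the statement is the Claim_ definition above) =====
theorem bigram_count_spec : Claim_equal_bigram_count := by
  unfold Claim_equal_bigram_count Spec_bigram_count bigram_count bigram_count_alt
  intro string _
  simp only [PySem.List.slice_none_none, PySem.List.slice_from_one]
  set a := PySem.Str.split₀ string with ha
  set pairs := a.zip a.tail with hpairs
  -- A's fold over indices = fold of pvStep over pairs
  simp only [pvStepA_eq]
  rw [pvRangeZipFold a "" pvStep PySem.Dict.empty]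
  -- keys of A's fold
  have hkeysA : (pairs.foldl pvStep PySem.Dict.empty).keys
      = PySem.List.dedup (pairs.map (·.1)) := by
    have := PySem.Dict.keys_foldl_insert_key pairs (fun p => p.1)
      (fun (d : PySem.Dict String (PySem.Dict String Int)) p =>
        (d.getD p.1 PySem.Dict.empty).insert p.2
          ((d.getD p.1 PySem.Dict.empty).getD p.2 0 + 1)) PySem.Dict.empty
    rw [PySem.List.dedup_eq_ofList]
    unfold pvStep
    exact this
  have hnodupA : (pairs.foldl pvStep PySem.Dict.empty).keys.Nodup := by
    apply PySem.Dict.nodup_keys_foldl_insert_key pairs (fun p => p.1)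
    simp
  -- A's items
  rw [PySem.Dict.items_eq_map_keys _ hnodupA PySem.Dict.empty, hkeysA]
  -- B's items
  rw [PySem.Dict.items_foldl_insert_fresh (PySem.List.dedup (pairs.map (·.1)))
        (fun c => c) _ PySem.Dict.empty (by intro c _; rfl)
        (by rw [List.map_id']; rw [PySem.List.dedup_eq_ofList]; exact PySem.Set.nodup_ofList _)]
  have hie : (PySem.Dict.empty : PySem.Dict String (PySem.Dict String Int)).items = [] := rfl
  rw [hie]
  simp only [List.nil_append, List.map_map]
  apply List.map_congr_left
  intro c _
  simp only [Function.comp]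
  congr 1
  -- inner dicts agree at every key c
  rw [pvGetD_foldl_step pairs PySem.Dict.empty c]
  rw [PySem.Dict.getD_empty]
  rw [PySem.Dict.foldl_insert_getD_add_one_eq_counter]
  rw [PySem.Dict.items_counter]
  rw [PySem.Dict.items_foldl_insert_fresh (PySem.List.dedup _) (fun n => n) _ PySem.Dict.empty
        (by intro n _; rfl)
        (by rw [List.map_id']; rw [PySem.List.dedup_eq_ofList]; exact PySem.Set.nodup_ofList _)]
  rw [PySem.List.dedup_eq_ofList]
  simp
  rfl
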